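-- pv_equiv track=rewrite | github.com/jeeveesee/Bioinformatics | BI1/Wk_5/Wk5_1_MTB_w_Gibbs.py | score_motifs
-- ===== SOURCE A (Python) =====
-- def score_motifs(motifs):
--     """ Scores motifs by summing the number of nucleotides not equal to the most freq nucleotide in each column"""
--     k = len(motifs[0])
--     t = len(motifs)
--     score = 0
--
--     for j in range(k):
--         column = [motif[j] for motif in motifs]
--         # Don't need to find the nucleotide, just its count
--         most_frequent_count = max(column.count(nuc) for nuc in 'ACGT')
--         score += t - most_frequent_count # How many nucleotide are NOT the most frequent in this column
--
--     return score
-- ===== SOURCE B (Python) =====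
-- def score_motifs(motifs):
--     """Scores motifs: per column, sort the column's ACGT characters and take the
--     longest run of equal characters in the sorted list (= the consensus count)."""
--     k = len(motifs[0])
--     t = len(motifs)
--     score = 0
--     for j in range(k):
--         col = sorted(motif[j] for motif in motifs if motif[j] in 'ACGT')
--         best = 0
--         run = 0
--         prev = None
--         for c in col:
--             run = run + 1 if c == prev else 1
--             prev = c
--             if run > best:
--                 best = run
--         score += t - best
--     return score
-- ===== Notes on version B (the rewrite author's own statement) =====
-- stated objective: alternative
-- what changed: Replaces A's per-column maximum of four list.count scans by a sort-then-scan: per column B sorts the column's ACGT characters and finds the consensus count as the longest run of equal characters in the sorted list.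
import Mathlib
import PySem

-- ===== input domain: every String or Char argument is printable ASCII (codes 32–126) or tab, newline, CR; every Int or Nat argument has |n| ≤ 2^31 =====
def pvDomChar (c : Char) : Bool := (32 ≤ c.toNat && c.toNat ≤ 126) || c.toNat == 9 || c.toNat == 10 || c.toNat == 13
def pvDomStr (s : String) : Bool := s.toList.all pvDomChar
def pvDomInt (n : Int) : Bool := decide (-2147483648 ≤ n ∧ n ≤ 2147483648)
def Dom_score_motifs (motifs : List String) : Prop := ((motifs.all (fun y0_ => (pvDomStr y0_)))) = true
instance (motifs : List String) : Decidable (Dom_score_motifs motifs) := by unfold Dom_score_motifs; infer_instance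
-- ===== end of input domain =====

-- B replaces A's four-counts-per-column maximum by a sort-then-scan: per column it sorts the
-- column's ACGT characters and takes the longest run of equal characters in the sorted list
-- (alternative algorithm, same return value); equivalence is proved on Pre_ (where Python A returns).

-- ===== PORT A =====
def score_motifs (motifs : List String) : Int :=
  let k : Nat := ((PySem.List.pyGet? motifs 0).getD "").toList.length
  let t : Int := (motifs.length : Int)
  (PySem.List.pyRange 0 (k : Int) 1).foldl (fun score j =>
    let column : List Char := motifs.map (fun motif => (PySem.Str.pyGet? motif j).getD ' ')
    -- max over the four ACGT counts ('ACGT' is nonempty, so the .getD 0 default never fires)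
    let most_frequent_count : Int :=
      ((PySem.List.max? ("ACGT".toList.map (fun nuc => (column.count nuc : Int))) (fun x => x)).getD 0)
    score + (t - most_frequent_count)) 0

-- ===== PORT B =====
def score_motifs_alt (motifs : List String) : Int :=
  let k : Nat := ((PySem.List.pyGet? motifs 0).getD "").toList.length
  let t : Int := (motifs.length : Int)
  (PySem.List.pyRange 0 (k : Int) 1).foldl (fun score j =>
    let col : List Char :=
      PySem.List.sorted
        ((motifs.map (fun motif => (PySem.Str.pyGet? motif j).getD ' ')).filter
          (fun c => c ∈ "ACGT".toList)) (fun x => x) false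
    let st :=
      col.foldl (fun (s : Int × Int × Option Char) c =>
        let run : Int := if some c = s.2.2 then s.2.1 + 1 else 1
        let prev : Option Char := some c
        let best : Int := if run > s.1 then run else s.1
        (best, run, prev)) (0, 0, none)
    score + (t - st.1)) 0

-- ===== PRECONDITION & SPEC =====
-- Pre_ excludes exactly the inputs on which the Python A raises IndexError: the empty list
-- (motifs[0]) and lists where some motif is shorter than the first (motif[j]).
def Pre_score_motifs (motifs : List String) : Prop :=
  motifs ≠ [] ∧ ∀ m ∈ motifs, (motifs.headD "").toList.length ≤ m.toList.length
instance (motifs : List String) : Decidable (Pre_score_motifs motifs) := by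
  unfold Pre_score_motifs; infer_instance
def pvWitness_score_motifs : List String := ["ACGT", "AACT", "TGCA"]

def Spec_score_motifs (motifs : List String) (out : Int) : Prop := out = score_motifs_alt motifs
instance (motifs : List String) (out : Int) : Decidable (Spec_score_motifs motifs out) := by unfold Spec_score_motifs; infer_instance

-- ===== CLAIM (what is proved, stated in full; the proofs are below) =====
def Claim_equal_score_motifs : Prop := ∀ (motifs : List String), Dom_score_motifs motifs → Pre_score_motifs motifs → Spec_score_motifs motifs (score_motifs motifs)

-- ===== LEMMAS AND PROOFS =====

-- the body of B's inner run-scan loop (definitionally the lambda in the port)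
def pvStep (s : Int × Int × Option Char) (c : Char) : Int × Int × Option Char :=
  let run : Int := if some c = s.2.2 then s.2.1 + 1 else 1
  let prev : Option Char := some c
  let best : Int := if run > s.1 then run else s.1
  (best, run, prev)

-- invariant of the run-scan over a sorted list: prev is the (maximal) last element,
-- run is its multiplicity, best is the maximal multiplicity
theorem pv_runfold_spec (l : List Char) (h : l.Pairwise (· ≤ ·)) (hne : l ≠ []) :
    ∃ p : Char, p ∈ l ∧ (∀ x ∈ l, x ≤ p) ∧
      (l.foldl pvStep (0, 0, none)).2.2 = some p ∧
      (l.foldl pvStep (0, 0, none)).2.1 = (l.count p : Int) ∧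
      (∀ v : Char, ((l.count v : Int)) ≤ (l.foldl pvStep (0, 0, none)).1) ∧
      (∃ v ∈ l, ((l.count v : Int)) = (l.foldl pvStep (0, 0, none)).1) := by
  induction l using List.reverseRecOn with
  | nil => exact absurd rfl hne
  | append_singleton d c ih =>
    rw [List.pairwise_append] at h
    obtain ⟨hd, -, hdc⟩ := h
    have hdc' : ∀ x ∈ d, x ≤ c := fun x hx => hdc x hx c (by simp)
    have hfold : (d ++ [c]).foldl pvStep (0, 0, none) =
        pvStep (d.foldl pvStep (0, 0, none)) c := by
      simp [List.foldl_append]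
    have hcnt : ∀ v : Char, (d ++ [c]).count v = d.count v + (if v = c then 1 else 0) := by
      intro v
      rcases eq_or_ne v c with hv | hv
      · simp [List.count_append, hv]
      · simp [List.count_append, hv, Ne.symm hv]
    by_cases hdnil : d = []
    · subst hdnil
      simp only [List.nil_append] at hcnt ⊢
      have hc1 : List.foldl pvStep (0, 0, none) [c] = (1, 1, some c) := by
        simp [pvStep]
      refine ⟨c, by simp, by simp, by rw [hc1], ?_, ?_, ⟨c, by simp, ?_⟩⟩
      · rw [hc1, hcnt c]; simp
      · intro v; rw [hc1, hcnt v]; split <;> simp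
      · rw [hc1, hcnt c]; simp
    · obtain ⟨p, hpmem, hple, hprev, hrun, hbest, v0, hv0mem, hv0⟩ := ih hd hdnil
      set st := d.foldl pvStep (0, 0, none) with hst
      by_cases hcp : c = p
      · -- run extends: c equals the previous (maximal) element
        subst hcp
        have R : pvStep st c = (if st.2.1 + 1 > st.1 then st.2.1 + 1 else st.1, st.2.1 + 1, some c) := by
          simp [pvStep, hprev]
        refine ⟨c, by simp, ?_, by rw [hfold, R], ?_, ?_, ?_⟩
        · intro x hx
          rcases List.mem_append.mp hx with hx | hx
          · exact hdc' x hx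
          · simp at hx; simp [hx]
        · rw [hfold, R, hcnt c, if_pos rfl, hrun]; push_cast; ring
        · intro v
          rw [hfold, R, hcnt v]
          have h1 := hbest v
          have h2 := hbest c
          by_cases hv : v = c
          · subst hv; rw [if_pos rfl]; rw [hrun] at *; push_cast; split <;> push_cast at * <;> omega
          · rw [if_neg hv]; split <;> push_cast at * <;> omega
        · rw [hfold, R]
          by_cases hgt : st.2.1 + 1 > st.1
          · refine ⟨c, by simp, ?_⟩
            rw [if_pos hgt, hcnt c, if_pos rfl, hrun]; push_cast; ring
          · have hv0c : v0 ≠ c := by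
              intro he; subst he
              rw [hrun] at hgt; rw [← hv0] at hgt; omega
            refine ⟨v0, by simp [hv0mem], ?_⟩
            rw [if_neg hgt, hcnt v0, if_neg hv0c, ← hv0]; push_cast; ring
      · -- new value, strictly larger than everything before: run resets to 1, best unchanged
        have hpc : p ≤ c := hdc' p hpmem
        have hcd : c ∉ d := fun hcd => hcp (le_antisymm (hple c hcd) hpc)
        have hcd0 : d.count c = 0 := List.count_eq_zero_of_not_mem hcd
        have h1le : (1 : Int) ≤ st.1 := by
          have h2 := hbest p
          have h3 : 0 < d.count p := List.count_pos_iff.mpr hpmem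
          omega
        have R : pvStep st c = (st.1, 1, some c) := by
          have hne' : ¬ (some c = st.2.2) := by rw [hprev]; simp [hcp]
          simp [pvStep, hne', not_lt.mpr h1le]
        refine ⟨c, by simp, ?_, by rw [hfold, R], ?_, ?_, ?_⟩
        · intro x hx
          rcases List.mem_append.mp hx with hx | hx
          · exact hdc' x hx
          · simp at hx; simp [hx]
        · rw [hfold, R, hcnt c, if_pos rfl, hcd0]; simp
        · intro v
          rw [hfold, R, hcnt v]
          have h1 := hbest v
          by_cases hv : v = c
          · subst hv; rw [if_pos rfl, hcd0]; push_cast; omega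
          · rw [if_neg hv]; push_cast at *; omega
        · have hv0c : v0 ≠ c := fun he => hcd (he ▸ hv0mem)
          refine ⟨v0, by simp [hv0mem], ?_⟩
          rw [hfold, R, hcnt v0, if_neg hv0c, ← hv0]; push_cast; ring

-- per-column bridge: longest run in the sorted ACGT-filtered column = max of the four ACGT counts
theorem pv_bridge (column : List Char) :
    ((PySem.List.sorted (column.filter (fun c => c ∈ "ACGT".toList)) (fun x => x) false).foldl
        pvStep (0, 0, none)).1
      = ((PySem.List.max? ("ACGT".toList.map (fun nuc => (column.count nuc : Int))) (fun x => x)).getD 0) := by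
  set f := column.filter (fun c => c ∈ "ACGT".toList) with hf
  set s := PySem.List.sorted f (fun x => x) false with hs
  have hperm : s.Perm f := PySem.List.sorted_perm f (fun x : Char => x) false
  have hcnt_s : ∀ v : Char, s.count v = f.count v := fun v => hperm.count_eq v
  have hcnt_f : ∀ v ∈ "ACGT".toList, f.count v = column.count v := by
    intro v hv
    rw [hf]
    exact List.count_filter (p := fun c => decide (c ∈ "ACGT".toList)) (by simpa using hv)
  have hsorted : s.Pairwise (· ≤ ·) := by
    have := PySem.List.sorted_pairwise f (fun x : Char => x)
    simpa [← hs] using this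
  set L := "ACGT".toList.map (fun nuc => (column.count nuc : Int)) with hL
  have hLne : L ≠ [] := by rw [hL]; simp [show "ACGT".toList = ['A','C','G','T'] by decide]
  obtain ⟨m, hm⟩ : ∃ m, PySem.List.max? L (fun x : Int => x) = some m := by
    cases hmx : PySem.List.max? L (fun x : Int => x) with
    | none => exact absurd ((PySem.List.max?_eq_none_iff L _).mp hmx) hLne
    | some m => exact ⟨m, rfl⟩
  have hmmem : m ∈ L := PySem.List.max?_mem hm
  have hmmax : ∀ y ∈ L, y ≤ m := by
    have := PySem.List.max?_isMax hm
    simpa using this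
  rw [hm, Option.getD_some]
  obtain ⟨nuc0, hnuc0, hnuc0m⟩ := List.mem_map.mp hmmem
  by_cases hsnil : s = []
  · have hf0 : f = [] := (PySem.List.sorted_eq_nil_iff f _ false).mp (hs ▸ hsnil)
    have h0 : column.count nuc0 = 0 := by
      rw [← hcnt_f nuc0 hnuc0, hf0, List.count_nil]
    rw [hsnil]
    simp only [List.foldl_nil]
    rw [← hnuc0m, h0]; simp
  · obtain ⟨p, hpmem, hple, hprev, hrun, hbest, v, hvmem, hv⟩ := pv_runfold_spec s hsorted hsnil
    apply le_antisymm
    · rw [← hv]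
      have hvf : v ∈ f := hperm.mem_iff.mp hvmem
      have hvA : v ∈ "ACGT".toList := by
        have := (List.mem_filter.mp (show v ∈ List.filter (fun c => decide (c ∈ "ACGT".toList)) column from hvf)).2
        simpa using this
      rw [hcnt_s, hcnt_f v hvA]
      exact hmmax _ (List.mem_map.mpr ⟨v, hvA, rfl⟩)
    · rw [← hnuc0m]
      have : (column.count nuc0 : Int) = (s.count nuc0 : Int) := by
        rw [hcnt_s, hcnt_f nuc0 hnuc0]
      rw [this]
      exact hbest nuc0

-- ===== VERDICT (by name: the statement is the Claim_ definition above) =====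
theorem score_motifs_spec : Claim_equal_score_motifs := by
  unfold Claim_equal_score_motifs Spec_score_motifs
  intro motifs _ _
  unfold score_motifs score_motifs_alt
  apply PySem.List.foldl_congr_mem
  intro acc j _
  have := pv_bridge (motifs.map (fun motif => (PySem.Str.pyGet? motif j).getD ' '))
  dsimp only
  rw [← this]
  rfl
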